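-- pv_equiv track=rewrite | github.com/quantinuum-dev/optyx | optyx/compiler/x_fusions.py | compute_photons_with_x_fusions_single_node
-- ===== SOURCE A (Python) =====
-- def compute_photons_with_x_fusions_single_node(trails: list[list[int]], r: int) -> list[list[int]]:
--     """Computes the number of photons in a single node in a trail
--
--     There is some ambiguity as to which trails the measurement photons in a
--     fusion should live and where the extra fusion photons should live as
--     well.
--
--     Here we have put the measurement photons in the first trail in the
--     decomposition that has the node, and spread the fusion photons evenly. So
--     in an N-way fusion, the first trail has one fusion photon, the next has
--     two, and the next next has two until the last which has one.
--     """
--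
--     # Key is the node and value is the indices of the trails which this node
--     # appears in in ascending order
--     occurances: dict[int, list[int]] = {}
--     for i, t in enumerate(trails):
--         for node in t:
--             trail_order = occurances.get(node, [])
--             trail_order.append(i)
--             occurances[node] = trail_order
--
--     # The number of photons in each node
--     photon_map: list[list[int]] = []
--
--     for trail_index, trail in enumerate(trails):
--         trail_photons = []
--
--         for node in trail:
--             # Start with all the measurement photons
--             num_photons = 0
--             trail_order = occurances[node]
--
--             if trail_order[0] == trail_index:
--                 # Add the measurement photon
--                 num_photons += 1
--
--             if len(trail_order) == 1:
--                 # No fusions here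
--                 trail_photons.append(num_photons)
--                 continue
--
--             # Spread the fusion photons evenly across the trails
--             if trail_order[0] == trail_index or trail_order[-1] == trail_index:
--                 num_photons += r
--             else:
--                 num_photons += 2*r
--
--             trail_photons.append(num_photons)
--         photon_map.append(trail_photons)
--
--     return photon_map
-- ===== SOURCE B (Python) =====
-- def compute_photons_with_x_fusions_single_node(trails: list[list[int]], r: int) -> list[list[int]]:
--     """Dict-free re-implementation: no occurrence index is built; for each
--     occurrence we decide first/last/unique by scanning the trails directly."""
--     photon_map = []
--     for i, trail in enumerate(trails):
--         row = []
--         for node in trail: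
--             first = all(node not in t for t in trails[:i])
--             last = all(node not in t for t in trails[i + 1:])
--             if sum(t.count(node) for t in trails) == 1:
--                 row.append(1)
--             else:
--                 row.append((1 if first else 0) + (r if first or last else 2 * r))
--         photon_map.append(row)
--     return photon_map
-- ===== Notes on version B (the rewrite author's own statement) =====
-- stated objective: simpler
-- what changed: Removes A's occurrence dictionary entirely: instead of building node->trail-index lists and looking them up, B decides first/last/unique for each occurrence by scanning the trail prefix, the trail suffix and counting over all trails directly (brute-force scans replace the hash index).
import Mathlib
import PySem

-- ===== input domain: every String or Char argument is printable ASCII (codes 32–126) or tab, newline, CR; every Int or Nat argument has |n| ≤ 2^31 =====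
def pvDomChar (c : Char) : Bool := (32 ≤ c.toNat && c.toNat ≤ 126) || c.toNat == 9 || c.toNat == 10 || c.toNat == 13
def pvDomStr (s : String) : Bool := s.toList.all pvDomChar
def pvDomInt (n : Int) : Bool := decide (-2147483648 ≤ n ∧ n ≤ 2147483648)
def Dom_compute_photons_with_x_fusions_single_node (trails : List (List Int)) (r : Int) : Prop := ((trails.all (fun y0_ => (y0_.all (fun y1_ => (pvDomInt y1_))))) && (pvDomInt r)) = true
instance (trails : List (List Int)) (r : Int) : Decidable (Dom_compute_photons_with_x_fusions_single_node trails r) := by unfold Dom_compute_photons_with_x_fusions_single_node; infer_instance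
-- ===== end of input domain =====

-- B drops A's occurrence dictionary: first/last/unique are decided per occurrence by scanning the trails directly (simpler, dict-free; same results).

-- ===== PORT A =====
-- occurances dict build: `occurances[node] = occurances.get(node, []) + [i]` is Dict.modify node [] (· ++ [i])
def compute_photons_with_x_fusions_single_node (trails : List (List Int)) (r : Int) : List (List Int) :=
  let occurances : PySem.Dict Int (List Int) :=
    (PySem.List.enumerate trails).foldl (fun occ p =>
      p.2.foldl (fun occ node => occ.modify node [] (· ++ [p.1])) occ) PySem.Dict.empty
  (PySem.List.enumerate trails).foldl (fun photon_map p =>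
    photon_map ++ [p.2.foldl (fun trail_photons node =>
      -- occurances[node] is always present and nonempty on this path: the getD/pyGetD defaults are unreachable
      let trail_order := occurances.getD node []
      let num_photons : Int := if PySem.List.pyGetD trail_order 0 0 = p.1 then 1 else 0
      if trail_order.length = 1 then trail_photons ++ [num_photons]
      else if PySem.List.pyGetD trail_order 0 0 = p.1 ∨ PySem.List.pyGetD trail_order (-1) 0 = p.1 then
        trail_photons ++ [num_photons + r]
      else trail_photons ++ [num_photons + 2 * r]) []]) []

-- ===== PORT B =====
def compute_photons_with_x_fusions_single_node_alt (trails : List (List Int)) (r : Int) : List (List Int) :=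
  (PySem.List.enumerate trails).foldl (fun photon_map p =>
    photon_map ++ [p.2.foldl (fun row node =>
      -- first = all(node not in t for t in trails[:i]); last = all(node not in t for t in trails[i+1:])
      let first := (PySem.List.slice trails none (some p.1)).all (fun t => !(t.contains node))
      let last := (PySem.List.slice trails (some (p.1 + 1)) none).all (fun t => !(t.contains node))
      -- sum(t.count(node) for t in trails)
      if (trails.map (fun t => (t.count node : Int))).sum = 1 then row ++ [(1 : Int)]
      else row ++ [(if first then (1 : Int) else 0) + (if first || last then r else 2 * r)]) []]) []

-- ===== PRECONDITION & SPEC =====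
def Spec_compute_photons_with_x_fusions_single_node (trails : List (List Int)) (r : Int) (out : List (List Int)) : Prop := out = compute_photons_with_x_fusions_single_node_alt trails r
instance (trails : List (List Int)) (r : Int) (out : List (List Int)) : Decidable (Spec_compute_photons_with_x_fusions_single_node trails r out) := by unfold Spec_compute_photons_with_x_fusions_single_node; infer_instance

-- ===== CLAIM (what is proved, stated in full; the proofs are below) =====
def Claim_equal_compute_photons_with_x_fusions_single_node : Prop := ∀ (trails : List (List Int)) (r : Int), Dom_compute_photons_with_x_fusions_single_node trails r → Spec_compute_photons_with_x_fusions_single_node trails r (compute_photons_with_x_fusions_single_node trails r)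

-- ===== LEMMAS AND PROOFS =====

-- all occurrences of the whole structure, as (node, trail_index, position)
def pvAllOcc (trails : List (List Int)) : List (Int × Int × Int) :=
  (PySem.List.enumerate trails).flatMap (fun p => (PySem.List.enumerate p.2).map (fun q => (q.2, p.1, q.1)))

-- the (trail_index, position) occurrence list of node n
def pvPlaces (trails : List (List Int)) (n : Int) : List (Int × Int) :=
  ((pvAllOcc trails).filter (fun x => x.1 == n)).map (·.2)

-- the trail-index occurrence list of node n (A's `occurances[n]`)
def pvOs (trails : List (List Int)) (n : Int) : List Int := (pvPlaces trails n).map (·.1)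

-- A's per-element photon formula, as a function of the trail-index list
def pvValD (r ti : Int) (os : List Int) : Int :=
  if os.length = 1 then (if PySem.List.pyGetD os 0 0 = ti then (1 : Int) else 0)
  else if PySem.List.pyGetD os 0 0 = ti ∨ PySem.List.pyGetD os (-1) 0 = ti then
    (if PySem.List.pyGetD os 0 0 = ti then (1 : Int) else 0) + r
  else (if PySem.List.pyGetD os 0 0 = ti then (1 : Int) else 0) + 2 * r

-- B's per-element photon formula
def pvBval (trails : List (List Int)) (r ti node : Int) : Int :=
  if (trails.map (fun t => (t.count node : Int))).sum = 1 then 1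
  else (if (PySem.List.slice trails none (some ti)).all (fun t => !(t.contains node)) then (1 : Int) else 0)
    + (if ((PySem.List.slice trails none (some ti)).all (fun t => !(t.contains node))
        || (PySem.List.slice trails (some (ti + 1)) none).all (fun t => !(t.contains node))) then r else 2 * r)

def pvTarget (trails : List (List Int)) (r : Int) : List (List Int) :=
  (PySem.List.enumerate trails).map (fun p => p.2.map (fun n => pvValD r p.1 (pvOs trails n)))

-- ---- A's dict characterization ----

theorem pv_occA_getD (trails : List (List Int)) (n : Int) :
    ((PySem.List.enumerate trails).foldl (fun occ p =>
      p.2.foldl (fun occ node => occ.modify node [] (· ++ [p.1])) occ)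
      (PySem.Dict.empty : PySem.Dict Int (List Int))).getD n []
    = pvOs trails n := by
  have h : ((PySem.List.enumerate trails).flatMap (fun p => p.2.map (fun node => (node, p.1)))).foldl
      (fun d pr => d.modify pr.1 [] (· ++ [pr.2])) (PySem.Dict.empty : PySem.Dict Int (List Int))
      = (PySem.List.enumerate trails).foldl (fun occ p =>
        p.2.foldl (fun occ node => occ.modify node [] (· ++ [p.1])) occ) PySem.Dict.empty := by
    simp only [List.foldl_flatMap, List.foldl_map]
  rw [← h, PySem.Dict.getD_foldl_modify_append]
  simp only [PySem.Dict.getD_empty, List.nil_append]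
  unfold pvOs pvPlaces pvAllOcc
  rw [List.map_map]
  have hfn : ∀ p : Int × List Int, (p.2.map (fun node => (node, p.1)))
      = (PySem.List.enumerate p.2).map (fun q => (q.2, p.1)) := by
    intro p
    conv_lhs => rw [← PySem.List.map_snd_enumerate p.2 0]
    rw [List.map_map]
    rfl
  rw [show (fun p : Int × List Int => p.2.map (fun node => (node, p.1)))
      = (fun p : Int × List Int => (PySem.List.enumerate p.2).map (fun q => (q.2, p.1))) from funext hfn]
  simp only [List.filter_flatMap, List.map_flatMap, List.filter_map, List.map_map]
  rfl

-- ---- A equals the target ----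

-- A's inner-loop body, parameterized by the dict lookup
def pvStepA (os : Int → List Int) (r ti : Int) (tp : List Int) (node : Int) : List Int :=
  let trail_order := os node
  let num_photons : Int := if PySem.List.pyGetD trail_order 0 0 = ti then 1 else 0
  if trail_order.length = 1 then tp ++ [num_photons]
  else if PySem.List.pyGetD trail_order 0 0 = ti ∨ PySem.List.pyGetD trail_order (-1) 0 = ti then
    tp ++ [num_photons + r]
  else tp ++ [num_photons + 2 * r]

theorem pvStepA_eq (os : Int → List Int) (r ti : Int) :
    pvStepA os r ti = fun tp node => tp ++ [pvValD r ti (os node)] := by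
  funext tp node
  simp only [pvStepA, pvValD]
  split_ifs <;> rfl

theorem pv_a_eq_target (trails : List (List Int)) (r : Int) :
    compute_photons_with_x_fusions_single_node trails r = pvTarget trails r := by
  have key : ∀ (os : Int → List Int), (∀ n, os n = pvOs trails n) →
      (PySem.List.enumerate trails).foldl
        (fun pm p => pm ++ [p.2.foldl (pvStepA os r p.1) []]) []
      = pvTarget trails r := by
    intro os hos
    have houter : (fun (pm : List (List Int)) (p : Int × List Int) =>
        pm ++ [p.2.foldl (pvStepA os r p.1) []])
        = fun pm p => pm ++ [p.2.map (fun node => pvValD r p.1 (os node))] := by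
      funext pm p
      rw [pvStepA_eq, PySem.List.foldl_append_singleton_eq_map, List.nil_append]
    rw [houter, PySem.List.foldl_append_singleton_eq_map, List.nil_append]
    unfold pvTarget
    simp only [hos]
  exact key _ (pv_occA_getD trails)

-- ---- the recursive shape of the occurrence-index list ----

def pvG : List (List Int) → Int → List Int
  | [], _ => []
  | t :: ts, n => List.replicate (t.count n) 0 ++ (pvG ts n).map (· + 1)

theorem pvG_shift (trails : List (List Int)) (n : Int) (s : Int) :
    (PySem.List.enumerate trails s).flatMap (fun p => List.replicate (p.2.count n) p.1)
    = (pvG trails n).map (· + s) := by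
  induction trails generalizing s with
  | nil => simp [pvG]
  | cons t ts ih =>
    rw [PySem.List.enumerate_cons, pvG]
    simp only [List.flatMap_cons, ih (s + 1), List.map_append, List.map_replicate, List.map_map]
    congr 1
    · rw [zero_add]
    · apply List.map_congr_left
      intro x _
      simp only [Function.comp_apply]
      ring

theorem pvOs_eq_pvG (trails : List (List Int)) (n : Int) :
    pvOs trails n = pvG trails n := by
  unfold pvOs pvPlaces pvAllOcc
  rw [List.map_map, List.filter_flatMap, List.map_flatMap]
  have hper : ∀ p : Int × List Int,
      ((((PySem.List.enumerate p.2).map (fun q => (q.2, p.1, q.1))).filter (fun x => x.1 == n)).map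
        ((·.1) ∘ (·.2)))
      = List.replicate (p.2.count n) p.1 := by
    intro p
    rw [List.filter_map, List.map_map]
    have hconst : (((·.1) ∘ (·.2)) ∘ fun q : Int × Int => (q.2, p.1, q.1)) = fun _ => p.1 := rfl
    rw [hconst, List.map_const']
    congr 1
    rw [← List.countP_eq_length_filter]
    have : ((fun x : Int × Int × Int => x.1 == n) ∘ fun q : Int × Int => (q.2, p.1, q.1))
        = fun q : Int × Int => q.2 == n := rfl
    rw [this]
    have h2 : (fun q : Int × Int => q.2 == n) = (fun x : Int => x == n) ∘ (·.2) := rfl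
    rw [h2, ← List.countP_map, PySem.List.map_snd_enumerate, ← List.count_eq_countP]
  rw [show (fun p : Int × List Int =>
        (((PySem.List.enumerate p.2).map (fun q => (q.2, p.1, q.1))).filter (fun x => x.1 == n)).map
          ((·.1) ∘ (·.2)))
      = fun p : Int × List Int => List.replicate (p.2.count n) p.1 from funext hper]
  rw [pvG_shift trails n 0]
  simp

-- ---- pointwise facts about pvG ----

theorem pvG_nil_iff (ts : List (List Int)) (n : Int) :
    pvG ts n = [] ↔ ∀ t ∈ ts, n ∉ t := by
  induction ts with
  | nil => simp [pvG]
  | cons t ts ih =>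
    simp only [pvG, List.append_eq_nil_iff, List.map_eq_nil_iff, List.replicate_eq_nil_iff,
      List.count_eq_zero, ih, List.mem_cons, forall_eq_or_imp]

theorem pvG_nonneg (ts : List (List Int)) (n : Int) : ∀ x ∈ pvG ts n, 0 ≤ x := by
  induction ts with
  | nil => simp [pvG]
  | cons t ts ih =>
    intro x hx
    rcases List.mem_append.mp hx with h | h
    · rw [List.eq_of_mem_replicate h]
    · obtain ⟨y, hy, rfl⟩ := List.mem_map.mp h
      have := ih y hy
      omega

theorem pvG_len (ts : List (List Int)) (n : Int) :
    (pvG ts n).length = (ts.map (fun t => t.count n)).sum := by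
  induction ts with
  | nil => simp [pvG]
  | cons t ts ih => simp [pvG, ih]

theorem pvG_head (ts : List (List Int)) (n : Int) (i : Nat) (hi : i < ts.length)
    (hn : n ∈ ts[i]) :
    ((pvG ts n).getD 0 0 = (i : Int)) ↔ ∀ t ∈ ts.take i, n ∉ t := by
  induction ts generalizing i with
  | nil => simp at hi
  | cons t ts ih =>
    match i with
    | 0 =>
      simp only [List.getElem_cons_zero] at hn
      have hc : 0 < t.count n := List.count_pos_iff.mpr hn
      have : pvG (t :: ts) n = 0 :: (List.replicate (t.count n - 1) 0 ++ (pvG ts n).map (· + 1)) := by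
        rw [pvG, show t.count n = (t.count n - 1) + 1 by omega, List.replicate_succ]
        simp
      rw [this]
      simp
    | k + 1 =>
      simp only [List.getElem_cons_succ] at hn
      have hk : k < ts.length := by simpa using hi
      by_cases hmem : n ∈ t
      · have hc : 0 < t.count n := List.count_pos_iff.mpr hmem
        have : pvG (t :: ts) n = 0 :: (List.replicate (t.count n - 1) 0 ++ (pvG ts n).map (· + 1)) := by
          rw [pvG, show t.count n = (t.count n - 1) + 1 by omega, List.replicate_succ]
          simp
        rw [this]
        constructor
        · intro h
          simp only [List.getD_cons_zero] at h
          omega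
        · intro h
          exact absurd hmem (h t (by simp [List.take_succ_cons]))
      · have hc : t.count n = 0 := List.count_eq_zero.mpr hmem
        have hne : pvG ts n ≠ [] := by
          rw [ne_eq, pvG_nil_iff]
          push_neg
          exact ⟨ts[k], List.getElem_mem hk, hn⟩
        obtain ⟨x, xs, hx⟩ := List.exists_cons_of_ne_nil hne
        have : pvG (t :: ts) n = (x + 1) :: xs.map (· + 1) := by
          rw [pvG, hc, hx]
          simp
        rw [this, List.take_succ_cons]
        simp only [List.getD_cons_zero, List.mem_cons, forall_eq_or_imp]
        have hih := ih k hk hn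
        rw [hx] at hih
        simp only [List.getD_cons_zero] at hih
        constructor
        · intro h
          exact ⟨hmem, hih.mp (by omega)⟩
        · intro ⟨_, h⟩
          have := hih.mpr h
          omega

theorem pv_getLast?_append_ne (l l' : List Int) (h : l' ≠ []) :
    (l ++ l').getLast? = l'.getLast? := by
  rw [List.getLast?_append, List.getLast?_eq_some_getLast h, Option.some_or]

theorem pvG_last (ts : List (List Int)) (n : Int) (i : Nat) (hi : i < ts.length)
    (hn : n ∈ ts[i]) :
    ((pvG ts n).getLast? = some (i : Int)) ↔ ∀ t ∈ ts.drop (i + 1), n ∉ t := by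
  induction ts generalizing i with
  | nil => simp at hi
  | cons t ts ih =>
    match i with
    | 0 =>
      simp only [List.getElem_cons_zero] at hn
      have hc : 0 < t.count n := List.count_pos_iff.mpr hn
      by_cases hts : pvG ts n = []
      · have hall : ∀ t' ∈ ts, n ∉ t' := (pvG_nil_iff ts n).mp hts
        have hrep : (pvG (t :: ts) n).getLast? = some 0 := by
          rw [pvG, hts]
          simp only [List.map_nil, List.append_nil, List.getLast?_replicate]
          rw [if_neg (by omega)]
        rw [hrep]
        simp only [List.drop_succ_cons, List.drop_zero, Nat.cast_zero]
        exact iff_of_true (by simp) hall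
      · have happ : (pvG (t :: ts) n).getLast? = ((pvG ts n).getLast?).map (· + 1) := by
          rw [pvG, pv_getLast?_append_ne _ _ (by simpa using hts), List.getLast?_map]
        obtain ⟨x, hx⟩ : ∃ x, (pvG ts n).getLast? = some x :=
          ⟨_, List.getLast?_eq_some_getLast hts⟩
        have hxmem : x ∈ pvG ts n := by
          obtain ⟨ys, hys⟩ := List.getLast?_eq_some_iff.mp hx
          rw [hys]; simp
        have hx0 : 0 ≤ x := pvG_nonneg ts n x hxmem
        rw [happ, hx]
        simp only [Option.map_some, Option.some_inj, List.drop_succ_cons, List.drop_zero,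
          Nat.cast_zero]
        constructor
        · intro h; omega
        · intro h; exact absurd ((pvG_nil_iff ts n).mpr h) hts
    | k + 1 =>
      simp only [List.getElem_cons_succ] at hn
      have hk : k < ts.length := by simpa using hi
      have hne : pvG ts n ≠ [] := by
        rw [ne_eq, pvG_nil_iff]
        push_neg
        exact ⟨ts[k], List.getElem_mem hk, hn⟩
      have happ : (pvG (t :: ts) n).getLast? = ((pvG ts n).getLast?).map (· + 1) := by
        rw [pvG, pv_getLast?_append_ne _ _ (by simpa using hne), List.getLast?_map]
      obtain ⟨x, hx⟩ : ∃ x, (pvG ts n).getLast? = some x :=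
        ⟨_, List.getLast?_eq_some_getLast hne⟩
      have hih := ih k hk hn
      rw [hx] at hih
      simp only [Option.some_inj] at hih
      rw [happ, hx]
      simp only [Option.map_some, Option.some_inj, List.drop_succ_cons]
      constructor
      · intro h
        exact hih.mp (by push_cast at h ⊢; omega)
      · intro h
        have := hih.mpr h
        push_cast at this ⊢
        omega

-- when the node occurs exactly once overall, its occurrence trail is the head
theorem pvG_len_one_head (ts : List (List Int)) (n : Int) (i : Nat) (hi : i < ts.length)
    (hn : n ∈ ts[i]) (hlen : (pvG ts n).length = 1) :
    (pvG ts n).getD 0 0 = (i : Int) := by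
  rw [pvG_head ts n i hi hn]
  intro t ht hmem
  have hsum : ((ts.map (fun t => t.count n))).sum
      = ((ts.map (fun t => t.count n)).take i).sum
        + (ts[i].count n + ((ts.map (fun t => t.count n)).drop (i + 1)).sum) := by
    conv_lhs => rw [← List.take_append_drop i (ts.map (fun t => t.count n))]
    rw [List.sum_append,
      List.drop_eq_getElem_cons (show i < (ts.map (fun t => t.count n)).length by simpa using hi)]
    simp
  rw [pvG_len] at hlen
  have h1 : 1 ≤ ts[i].count n := List.count_pos_iff.mpr hn
  have h2 : 1 ≤ t.count n := List.count_pos_iff.mpr hmem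
  have h3 : t.count n ≤ ((ts.map (fun t => t.count n)).take i).sum := by
    refine List.le_sum_of_mem ?_
    rw [← List.map_take]
    exact List.mem_map.mpr ⟨t, ht, rfl⟩
  omega

-- cast of the length to the Int sum B computes
theorem pv_sum_cast (ts : List (List Int)) (n : Int) :
    (ts.map (fun t => (t.count n : Int))).sum = ((pvG ts n).length : Int) := by
  rw [pvG_len]
  induction ts with
  | nil => simp
  | cons t ts ih => simp [ih]

-- ---- the pointwise equality of the two per-element formulas ----

theorem pv_val_eq (trails : List (List Int)) (r : Int) (i : Nat) (hi : i < trails.length)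
    (n : Int) (hn : n ∈ trails[i]) :
    pvValD r (i : Int) (pvOs trails n) = pvBval trails r (i : Int) n := by
  rw [pvOs_eq_pvG]
  have hne : pvG trails n ≠ [] := by
    rw [ne_eq, pvG_nil_iff]
    push_neg
    exact ⟨trails[i], List.getElem_mem hi, hn⟩
  have hfb : ((PySem.List.slice trails none (some (i : Int))).all (fun t => !(t.contains n)) = true)
      ↔ ∀ t ∈ trails.take i, n ∉ t := by
    rw [PySem.List.slice_to_natCast]
    simp
  have hlb : ((PySem.List.slice trails (some ((i : Int) + 1)) none).all (fun t => !(t.contains n)) = true)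
      ↔ ∀ t ∈ trails.drop (i + 1), n ∉ t := by
    rw [show ((i : Int) + 1) = ((i + 1 : Nat) : Int) by push_cast; ring,
      PySem.List.slice_from_natCast]
    simp
  have hH : ((pvG trails n).getD 0 0 = (i : Int)) ↔ ∀ t ∈ trails.take i, n ∉ t :=
    pvG_head trails n i hi hn
  have hL : ((pvG trails n).getLast hne = (i : Int)) ↔ ∀ t ∈ trails.drop (i + 1), n ∉ t := by
    rw [← pvG_last trails n i hi hn, List.getLast?_eq_some_getLast hne]
    simp
  unfold pvValD pvBval
  rw [PySem.List.pyGetD_zero, PySem.List.pyGetD_neg_one _ _ hne]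
  simp only [pv_sum_cast, Nat.cast_eq_one]
  by_cases hone : (pvG trails n).length = 1
  · rw [if_pos hone, if_pos hone, if_pos (pvG_len_one_head trails n i hi hn hone)]
  · rw [if_neg hone, if_neg hone]
    by_cases h1 : ∀ t ∈ trails.take i, n ∉ t <;> by_cases h2 : ∀ t ∈ trails.drop (i + 1), n ∉ t
    · rw [if_pos (Or.inl (hH.mpr h1)), if_pos (hH.mpr h1), if_pos (hfb.mpr h1),
        if_pos (show _ = true by rw [hfb.mpr h1, Bool.true_or])]
    · rw [if_pos (Or.inl (hH.mpr h1)), if_pos (hH.mpr h1), if_pos (hfb.mpr h1),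
        if_pos (show _ = true by rw [hfb.mpr h1, Bool.true_or])]
    · rw [if_pos (Or.inr (hL.mpr h2)), if_neg (fun h => h1 (hH.mp h)),
        if_neg (fun h => h1 (hfb.mp h)),
        if_pos (show _ = true by rw [hlb.mpr h2, Bool.or_true])]
    · have hA : ¬((pvG trails n).getD 0 0 = (i : Int) ∨ (pvG trails n).getLast hne = (i : Int)) := by
        rintro (h | h)
        · exact h1 (hH.mp h)
        · exact h2 (hL.mp h)
      have hB : ¬(((PySem.List.slice trails none (some (i : Int))).all (fun t => !(t.contains n))
          || (PySem.List.slice trails (some ((i : Int) + 1)) none).all (fun t => !(t.contains n))) = true) := by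
        intro hor
        rcases Bool.or_eq_true_iff.mp hor with h | h
        · exact h1 (hfb.mp h)
        · exact h2 (hlb.mp h)
      rw [if_neg hA, if_neg (fun h => h1 (hH.mp h)), if_neg (fun h => h1 (hfb.mp h)), if_neg hB]

-- ---- B equals the target ----

theorem pv_b_eq_target (trails : List (List Int)) (r : Int) :
    compute_photons_with_x_fusions_single_node_alt trails r = pvTarget trails r := by
  have hstep : ∀ ti : Int, (fun (row : List Int) (node : Int) =>
      let first := (PySem.List.slice trails none (some ti)).all (fun t => !(t.contains node))
      let last := (PySem.List.slice trails (some (ti + 1)) none).all (fun t => !(t.contains node))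
      if (trails.map (fun t => (t.count node : Int))).sum = 1 then row ++ [(1 : Int)]
      else row ++ [(if first then (1 : Int) else 0) + (if first || last then r else 2 * r)])
      = fun row node => row ++ [pvBval trails r ti node] := by
    intro ti
    funext row node
    simp only [pvBval]
    split_ifs <;> rfl
  have hB : compute_photons_with_x_fusions_single_node_alt trails r
      = (PySem.List.enumerate trails).map (fun p => p.2.map (fun n => pvBval trails r p.1 n)) := by
    unfold compute_photons_with_x_fusions_single_node_alt
    have houter : (fun (pm : List (List Int)) (p : Int × List Int) =>
        pm ++ [p.2.foldl (fun row node =>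
          let first := (PySem.List.slice trails none (some p.1)).all (fun t => !(t.contains node))
          let last := (PySem.List.slice trails (some (p.1 + 1)) none).all (fun t => !(t.contains node))
          if (trails.map (fun t => (t.count node : Int))).sum = 1 then row ++ [(1 : Int)]
          else row ++ [(if first then (1 : Int) else 0) + (if first || last then r else 2 * r)]) []])
        = fun pm p => pm ++ [p.2.map (fun n => pvBval trails r p.1 n)] := by
      funext pm p
      rw [hstep p.1, PySem.List.foldl_append_singleton_eq_map, List.nil_append]
    rw [houter, PySem.List.foldl_append_singleton_eq_map, List.nil_append]
  rw [hB]
  unfold pvTarget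
  apply List.map_congr_left
  intro p hp
  obtain ⟨k, hk, rfl⟩ := (PySem.List.mem_enumerate_iff _ _ _).mp hp
  apply List.map_congr_left
  intro n hn
  have : ((0 : Int) + (k : Int)) = (k : Int) := by ring
  rw [this]
  exact (pv_val_eq trails r k hk n hn).symm

-- ===== VERDICT (by name: the statement is the Claim_ definition above) =====
theorem compute_photons_with_x_fusions_single_node_spec : Claim_equal_compute_photons_with_x_fusions_single_node := by
  intro trails r _
  unfold Spec_compute_photons_with_x_fusions_single_node
  rw [pv_a_eq_target, pv_b_eq_target]
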